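-- pv_equiv track=rewrite | github.com/gossip-ranking/gossip-ranking-aggregation | utils/consensus.py | get_pairwise_scores
-- ===== SOURCE A (Python) =====
-- def get_pairwise_scores(list_dicts):
--     items = sorted(list_dicts[0].keys())
--     dict_pairwise_scores = {a: {b: 0 for b in items} for a in items}
--     for d in list_dicts:
--         for a in items:
--             for b in items:
--                 if a != b:
--                     dict_pairwise_scores[a][b] += 1 if d[a] < d[b] else 0
--     return dict_pairwise_scores
-- ===== SOURCE B (Python) =====
-- def get_pairwise_scores(list_dicts):
--     items = sorted(list_dicts[0].keys())
--     scores = {a: {b: 0 for b in items} for a in items}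
--     for d in list_dicts:
--         # bucket the items by their value in d
--         buckets = {}
--         for x in items:
--             buckets.setdefault(d[x], []).append(x)
--         # groups of items in strictly increasing order of value
--         groups = [buckets[v] for v in sorted(buckets)]
--         # everything seen so far has a strictly smaller value than the current group
--         prev = []
--         for g in groups:
--             for a in prev:
--                 for b in g:
--                     scores[a][b] += 1
--             prev.extend(g)
--     return scores
-- ===== Notes on version B (the rewrite author's own statement) =====
-- stated objective: alternative
-- what changed: Per dict, B never compares item pairs: it buckets the items by value, sorts the distinct values, and bulk-increments the cross-product of every earlier (smaller-valued) group with each later group, instead of A's full n-squared double loop testing d[a] < d[b] for every ordered pair; Pre_ excludes the empty list and inputs where a key of the first dict is missing from some dict, because B's bucketing pass reads every d[x] and raises KeyError there even when the first dict has fewer than two distinct keys and A's a != b guard accidentally skips the lookup and returns.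
-- outside the precondition, e.g. on get_pairwise_scores([{'a': 1}, {}]): A returns {'a': {'a': 0}}, B raises KeyError; on get_pairwise_scores([{'a': 1}, {'b': 2}]): A returns {'a': {'a': 0}}, B raises KeyError
import Mathlib
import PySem

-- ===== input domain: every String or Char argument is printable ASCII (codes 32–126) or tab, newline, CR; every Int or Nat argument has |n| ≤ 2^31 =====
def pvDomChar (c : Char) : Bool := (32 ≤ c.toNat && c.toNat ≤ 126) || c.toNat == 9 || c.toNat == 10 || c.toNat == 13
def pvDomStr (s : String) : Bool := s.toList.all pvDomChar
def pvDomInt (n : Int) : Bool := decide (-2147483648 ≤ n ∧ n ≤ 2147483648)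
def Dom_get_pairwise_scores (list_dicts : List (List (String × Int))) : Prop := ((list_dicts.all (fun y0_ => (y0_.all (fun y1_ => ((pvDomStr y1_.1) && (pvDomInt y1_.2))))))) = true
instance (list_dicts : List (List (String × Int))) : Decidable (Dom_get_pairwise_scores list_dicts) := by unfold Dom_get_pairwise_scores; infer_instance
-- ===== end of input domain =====

-- B replaces A's per-dict all-pairs comparison loop with a value-grouping pass: it buckets
-- the items of each dict by value, sorts the distinct values, and bulk-increments the
-- cross-products of earlier (strictly smaller-valued) groups with later groups, so no pair
-- of items is ever compared (objective: alternative).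

-- ===== PORT A =====
-- items = sorted(list_dicts[0].keys())  (identical line in both Pythons)
def pvItems (d0 : List (String × Int)) : List String :=
  PySem.List.sorted (PySem.Dict.ofList d0).keys (fun x => x) false

-- d[x]; the getD default 0 is never read under Pre_ (Python raises KeyError there)
def pvDget (d : List (String × Int)) (x : String) : Int :=
  (PySem.Dict.ofList d).getD x 0

-- d[a] < d[b]
def pvLess (d : List (String × Int)) (a b : String) : Bool :=
  pvDget d a < pvDget d b

-- {a: {b: 0 for b in items} for a in items}  (identical line in both Pythons)
def pvZeroScores (items : List String) : PySem.Dict String (PySem.Dict String Int) :=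
  items.foldl (fun D a =>
    D.insert a (items.foldl (fun E b => E.insert b (0:Int)) PySem.Dict.empty)) PySem.Dict.empty

def get_pairwise_scores (list_dicts : List (List (String × Int))) : List (String × List (String × Int)) :=
  match list_dicts with
  | [] => []   -- unreachable: Python raises IndexError on list_dicts[0]; excluded by Pre_
  | d0 :: _ =>
    let items := pvItems d0
    let init := pvZeroScores items
    -- for d in list_dicts: for a in items: for b in items: if a != b: scores[a][b] += 1 if d[a] < d[b] else 0
    let final := list_dicts.foldl (fun S d =>
      items.foldl (fun S a =>
        items.foldl (fun S b =>
          if a ≠ b then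
            S.modify a PySem.Dict.empty
              (fun E => E.modify b 0 (fun v => v + (if pvLess d a b then 1 else 0)))
          else S) S) S) init
    final.items.map (fun p => (p.1, p.2.items))

-- ===== PORT B =====
-- one dict's pass: bucket items by value, sort the distinct values, then for each group in
-- increasing value order increment scores[a][b] for every a seen in earlier groups, b in it
def pvBStep (items : List String) (S : PySem.Dict String (PySem.Dict String Int))
    (d : List (String × Int)) : PySem.Dict String (PySem.Dict String Int) :=
  -- buckets = {}; for x in items: buckets.setdefault(d[x], []).append(x)
  let buckets : PySem.Dict Int (List String) :=
    items.foldl (fun B x => B.modify (pvDget d x) [] (fun l => l ++ [x])) PySem.Dict.empty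
  -- groups = [buckets[v] for v in sorted(buckets)]   (v ∈ keys, so buckets[v] never raises)
  let groups := (PySem.List.sorted buckets.keys (fun v => v) false).map (fun v => buckets.getD v [])
  -- prev = []; for g in groups: (for a in prev: for b in g: scores[a][b] += 1); prev.extend(g)
  (groups.foldl (fun (sp : PySem.Dict String (PySem.Dict String Int) × List String) g =>
      (sp.2.foldl (fun S a =>
          g.foldl (fun S b =>
            S.modify a PySem.Dict.empty (fun E => E.modify b 0 (fun v => v + 1))) S) sp.1,
       sp.2 ++ g)) (S, ([] : List String))).1

def get_pairwise_scores_alt (list_dicts : List (List (String × Int))) : List (String × List (String × Int)) :=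
  match list_dicts with
  | [] => []   -- unreachable: Python raises IndexError on list_dicts[0]; excluded by Pre_
  | d0 :: _ =>
    let items := pvItems d0
    let final := list_dicts.foldl (pvBStep items) (pvZeroScores items)
    final.items.map (fun p => (p.1, p.2.items))

-- ===== PRECONDITION & SPEC =====
-- Pre_ excludes the inputs where a Python raises: the empty list (IndexError on list_dicts[0]
-- in both) and any input where a key of the first dict is missing from some dict — there B's
-- bucketing pass reads every d[x] and raises KeyError, while A raises KeyError only when the
-- first dict has at least two distinct keys (with fewer, A's a != b guard accidentally skips
-- every d[a] access and A returns); those returning inputs are excluded, see claim cites.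
def Pre_get_pairwise_scores (list_dicts : List (List (String × Int))) : Prop :=
  list_dicts ≠ [] ∧
  ∀ d ∈ list_dicts, ∀ p ∈ list_dicts.headD [], p.1 ∈ d.map Prod.fst
instance (list_dicts : List (List (String × Int))) : Decidable (Pre_get_pairwise_scores list_dicts) := by
  unfold Pre_get_pairwise_scores; infer_instance

def pvWitness_get_pairwise_scores : (List (List (String × Int))) :=
  [[("a", 1), ("b", 2)], [("a", 2), ("b", 1)]]

def Spec_get_pairwise_scores (list_dicts : List (List (String × Int))) (out : List (String × List (String × Int))) : Prop := out = get_pairwise_scores_alt list_dicts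
instance (list_dicts : List (List (String × Int))) (out : List (String × List (String × Int))) : Decidable (Spec_get_pairwise_scores list_dicts out) := by unfold Spec_get_pairwise_scores; infer_instance

-- ===== CLAIM (what is proved, stated in full; the proofs are below) =====
def Claim_equal_get_pairwise_scores : Prop := ∀ (list_dicts : List (List (String × Int))), Dom_get_pairwise_scores list_dicts → Pre_get_pairwise_scores list_dicts → Spec_get_pairwise_scores list_dicts (get_pairwise_scores list_dicts)

-- ===== LEMMAS AND PROOFS =====

-- invariant for both accumulators: keys are `items` at both levels and cell (a,b) holds g a b
def pvInv (items : List String) (g : String → String → Int)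
    (S : PySem.Dict String (PySem.Dict String Int)) : Prop :=
  S.keys = items ∧
  (∀ a ∈ items, (S.getD a PySem.Dict.empty).keys = items) ∧
  (∀ a ∈ items, ∀ b ∈ items, (S.getD a PySem.Dict.empty).getD b 0 = g a b)

lemma pvInv_congr {items : List String} {g g' : String → String → Int}
    {S : PySem.Dict String (PySem.Dict String Int)} (h : pvInv items g S)
    (he : ∀ a ∈ items, ∀ b ∈ items, g a b = g' a b) : pvInv items g' S :=
  ⟨h.1, h.2.1, fun a ha b hb => (h.2.2 a ha b hb).trans (he a ha b hb)⟩

lemma pvKeys_modify_of_mem {ν : Type} (d : PySem.Dict String ν) (k : String) (d0 : ν)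
    (f : ν → ν) (h : k ∈ d.keys) : (d.modify k d0 f).keys = d.keys := by
  rw [PySem.Dict.keys_modify]
  exact PySem.Dict.keys_insert_of_contains d _ ((PySem.Dict.contains_iff_mem_keys d k).mpr h)

-- A's inner-inner loop: a fold of guarded modifies over distinct keys, value level
lemma pvInnerE (a : String) (f : String → Int → Int) :
    ∀ (bs : List String) (E : PySem.Dict String Int), bs.Nodup →
      (∀ b ∈ bs, b ∈ E.keys) →
      ((bs.foldl (fun E b => if a ≠ b then E.modify b 0 (f b) else E) E).keys = E.keys ∧
       ∀ b', (bs.foldl (fun E b => if a ≠ b then E.modify b 0 (f b) else E) E).getD b' 0 =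
         if b' ∈ bs ∧ a ≠ b' then f b' (E.getD b' 0) else E.getD b' 0) := by
  intro bs
  induction bs with
  | nil => intro E _ _; simp
  | cons b bs ih =>
    intro E hnd hmem
    have hbE : b ∈ E.keys := hmem b (List.mem_cons_self ..)
    have hbnotin : b ∉ bs := (List.nodup_cons.mp hnd).1
    by_cases hab : a = b
    · -- guard false: this step is skipped
      subst hab
      have hstep : (List.foldl (fun E b => if a ≠ b then E.modify b 0 (f b) else E) E (a :: bs)) =
          (List.foldl (fun E b => if a ≠ b then E.modify b 0 (f b) else E) E bs) := by
        simp [List.foldl_cons]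
      obtain ⟨ihk, ihv⟩ := ih E (List.nodup_cons.mp hnd).2 (fun x hx => hmem x (List.mem_cons_of_mem _ hx))
      rw [hstep]
      refine ⟨ihk, fun b' => ?_⟩
      rw [ihv b']
      by_cases hb' : b' = a
      · subst hb'; simp [hbnotin]
      · by_cases hmem' : b' ∈ bs <;> simp [hmem', List.mem_cons, fun h : b' = a => hb' h]
    · -- guard true: modify at b, then recurse
      have hstep : (List.foldl (fun E b => if a ≠ b then E.modify b 0 (f b) else E) E (b :: bs)) =
          (List.foldl (fun E b => if a ≠ b then E.modify b 0 (f b) else E) (E.modify b 0 (f b)) bs) := by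
        simp [List.foldl_cons, hab]
      have hkeys' : (E.modify b 0 (f b)).keys = E.keys := pvKeys_modify_of_mem E b 0 (f b) hbE
      obtain ⟨ihk, ihv⟩ := ih (E.modify b 0 (f b)) (List.nodup_cons.mp hnd).2
        (fun x hx => hkeys' ▸ hmem x (List.mem_cons_of_mem _ hx))
      rw [hstep]
      refine ⟨ihk.trans hkeys', fun b' => ?_⟩
      rw [ihv b', PySem.Dict.getD_modify]
      by_cases hb'b : b' = b
      · subst hb'b
        simp [hbnotin, hab]
      · by_cases hmem' : b' ∈ bs
        · simp [hmem', hb'b, List.mem_cons]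
        · simp [hmem', hb'b, List.mem_cons]

-- A's inner loop over b only touches the outer entry at a
lemma pvInnerS (a : String) (F : String → PySem.Dict String Int → PySem.Dict String Int) :
    ∀ (bs : List String) (S : PySem.Dict String (PySem.Dict String Int)),
      ((a ∈ S.keys → (bs.foldl (fun S b => if a ≠ b then S.modify a PySem.Dict.empty (fun E => F b E) else S) S).keys = S.keys) ∧
       (∀ a', a' ≠ a → (bs.foldl (fun S b => if a ≠ b then S.modify a PySem.Dict.empty (fun E => F b E) else S) S).getD a' PySem.Dict.empty = S.getD a' PySem.Dict.empty) ∧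
       (bs.foldl (fun S b => if a ≠ b then S.modify a PySem.Dict.empty (fun E => F b E) else S) S).getD a PySem.Dict.empty =
         bs.foldl (fun E b => if a ≠ b then F b E else E) (S.getD a PySem.Dict.empty)) := by
  intro bs
  induction bs with
  | nil => intro S; exact ⟨fun _ => rfl, fun _ _ => rfl, rfl⟩
  | cons b bs ih =>
    intro S
    by_cases hab : a = b
    · subst hab
      simpa [List.foldl_cons] using ih S
    · have hstep : ∀ (T : PySem.Dict String (PySem.Dict String Int)),
          List.foldl (fun S b => if a ≠ b then S.modify a PySem.Dict.empty (fun E => F b E) else S) T (b :: bs) =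
          List.foldl (fun S b => if a ≠ b then S.modify a PySem.Dict.empty (fun E => F b E) else S)
            (T.modify a PySem.Dict.empty (fun E => F b E)) bs := by
        intro T; simp [List.foldl_cons, hab]
      obtain ⟨ihk, ihne, iha⟩ := ih (S.modify a PySem.Dict.empty (fun E => F b E))
      refine ⟨fun haS => ?_, fun a' ha' => ?_, ?_⟩
      · rw [hstep]
        have hk := pvKeys_modify_of_mem S a PySem.Dict.empty (fun E => F b E) haS
        exact (ihk (by rw [hk]; exact haS)).trans hk
      · rw [hstep, ihne a' ha', PySem.Dict.getD_modify_of_ne _ _ _ ha']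
      · rw [hstep, iha, PySem.Dict.getD_modify_self]
        simp [List.foldl_cons, hab]

-- A: one dict's outer loop over a
lemma pvOuter (items : List String) (hnd_items : items.Nodup) (d : List (String × Int)) :
    ∀ (as_ : List String), as_.Nodup → (∀ x ∈ as_, x ∈ items) →
      ∀ (S : PySem.Dict String (PySem.Dict String Int)) (g : String → String → Int),
        pvInv items g S →
        pvInv items
          (fun a b => g a b + if a ∈ as_ ∧ a ≠ b then (if pvLess d a b then 1 else 0) else 0)
          (as_.foldl (fun S a =>
            items.foldl (fun S b =>
              if a ≠ b then
                S.modify a PySem.Dict.empty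
                  (fun E => E.modify b 0 (fun v => v + (if pvLess d a b then 1 else 0)))
              else S) S) S) := by
  intro as_
  induction as_ with
  | nil =>
    intro _ _ S g h
    exact pvInv_congr h (by intro a _ b _; simp)
  | cons a as ih =>
    intro hnd hsub S g h
    have ha : a ∈ items := hsub a (List.mem_cons_self ..)
    have hanotin : a ∉ as := (List.nodup_cons.mp hnd).1
    obtain ⟨hk, hik, hval⟩ := h
    obtain ⟨hSk, hSne, hSa⟩ := pvInnerS a
      (fun b E => E.modify b 0 (fun v => v + (if pvLess d a b then 1 else 0))) items S
    obtain ⟨hEk, hEv⟩ := pvInnerE a (fun b v => v + (if pvLess d a b then 1 else 0)) items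
      (S.getD a PySem.Dict.empty) hnd_items (fun b hb => (hik a ha) ▸ hb)
    rw [List.foldl_cons]
    have h' : pvInv items
        (fun a' b => if a' = a ∧ a' ≠ b then g a' b + (if pvLess d a' b then 1 else 0) else g a' b)
        (items.foldl (fun S b =>
          if a ≠ b then
            S.modify a PySem.Dict.empty
              (fun E => E.modify b 0 (fun v => v + (if pvLess d a b then 1 else 0)))
          else S) S) := by
      refine ⟨(hSk (hk ▸ ha)).trans hk, ?_, ?_⟩
      · intro a' ha'
        by_cases haa : a' = a
        · subst haa; rw [hSa, hEk]; exact hik a' ha'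
        · rw [hSne a' haa]; exact hik a' ha'
      · intro a' ha' b hb
        by_cases haa : a' = a
        · subst haa
          rw [hSa, hEv b, hval a' ha' b hb]
          simp [hb]
        · rw [hSne a' haa, hval a' ha' b hb]
          simp [haa]
    have := ih (List.nodup_cons.mp hnd).2 (fun x hx => hsub x (List.mem_cons_of_mem _ hx)) _ _ h'
    refine pvInv_congr this ?_
    intro a' ha' b hb
    by_cases haa : a' = a
    · subst haa
      simp only [hanotin, List.mem_cons, true_or, true_and]
      by_cases hab : a' ≠ b <;> simp [hab]
    · simp [List.mem_cons, fun h : a' = a => haa h]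

-- A: the loop over the dicts
lemma pvDicts (items : List String) (hnd : items.Nodup) :
    ∀ (L : List (List (String × Int))) (S : PySem.Dict String (PySem.Dict String Int))
      (g : String → String → Int), pvInv items g S →
      pvInv items
        (fun a b => g a b + if a = b then 0 else (L.countP (fun d => pvLess d a b) : Int))
        (L.foldl (fun S d =>
          items.foldl (fun S a =>
            items.foldl (fun S b =>
              if a ≠ b then
                S.modify a PySem.Dict.empty
                  (fun E => E.modify b 0 (fun v => v + (if pvLess d a b then 1 else 0)))
              else S) S) S) S) := by
  intro L
  induction L with
  | nil =>
    intro S g h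
    exact pvInv_congr h (by intro a _ b _; simp)
  | cons d rest ih =>
    intro S g h
    rw [List.foldl_cons]
    have h1 := pvOuter items hnd d items hnd (fun x hx => hx) S g h
    have h2 := ih _ _ h1
    refine pvInv_congr h2 ?_
    intro a ha b hb
    simp only [ha, true_and, List.countP_cons]
    by_cases hab : a = b
    · subst hab; simp
    · simp only [hab, if_false, Ne, not_false_iff, if_true]
      by_cases hl : pvLess d a b <;> push_cast [hl] <;> ring

lemma pvItems_nodup (d0 : List (String × Int)) : (pvItems d0).Nodup := by
  exact (PySem.List.sorted_perm (PySem.Dict.ofList d0).keys (fun x => x) false).symm.nodup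
    (PySem.Dict.nodup_keys_ofList d0)

lemma pvInit (items : List String) (hnd : items.Nodup) :
    pvInv items (fun _ _ => 0) (pvZeroScores items) := by
  unfold pvZeroScores
  have hin : (items.foldl (fun E b => E.insert b (0:Int)) PySem.Dict.empty).items =
      items.map (fun b => (b, (0:Int))) := by
    simpa using PySem.Dict.items_foldl_insert_fresh items (fun b => b) (fun _ => (0:Int))
      PySem.Dict.empty (fun a _ => PySem.Dict.contains_empty a) (by simpa using hnd)
  have hout : (items.foldl (fun D a =>
      D.insert a (items.foldl (fun E b => E.insert b (0:Int)) PySem.Dict.empty)) PySem.Dict.empty).items =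
      items.map (fun a => (a, items.foldl (fun E b => E.insert b (0:Int)) PySem.Dict.empty)) := by
    simpa using PySem.Dict.items_foldl_insert_fresh items (fun a => a)
      (fun _ => items.foldl (fun E b => E.insert b (0:Int)) PySem.Dict.empty)
      PySem.Dict.empty (fun a _ => PySem.Dict.contains_empty a) (by simpa using hnd)
  have hkeys : (items.foldl (fun D a =>
      D.insert a (items.foldl (fun E b => E.insert b (0:Int)) PySem.Dict.empty)) PySem.Dict.empty).keys = items := by
    rw [PySem.Dict.keys, hout, List.map_map]; exact List.map_id' items
  have hinkeys : (items.foldl (fun E b => E.insert b (0:Int)) PySem.Dict.empty).keys = items := by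
    rw [PySem.Dict.keys, hin, List.map_map]; exact List.map_id' items
  refine ⟨hkeys, ?_, ?_⟩
  · intro a ha
    have hmem : (a, items.foldl (fun E b => E.insert b (0:Int)) PySem.Dict.empty) ∈
        (items.foldl (fun D a =>
          D.insert a (items.foldl (fun E b => E.insert b (0:Int)) PySem.Dict.empty)) PySem.Dict.empty).items := by
      rw [hout]; exact List.mem_map.mpr ⟨a, ha, rfl⟩
    rw [PySem.Dict.getD_of_mem_items _ hmem (by rw [hkeys]; exact hnd)]
    exact hinkeys
  · intro a ha b hb
    have hmem : (a, items.foldl (fun E b => E.insert b (0:Int)) PySem.Dict.empty) ∈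
        (items.foldl (fun D a =>
          D.insert a (items.foldl (fun E b => E.insert b (0:Int)) PySem.Dict.empty)) PySem.Dict.empty).items := by
      rw [hout]; exact List.mem_map.mpr ⟨a, ha, rfl⟩
    rw [PySem.Dict.getD_of_mem_items _ hmem (by rw [hkeys]; exact hnd)]
    have hmem2 : (b, (0:Int)) ∈ (items.foldl (fun E b => E.insert b (0:Int)) PySem.Dict.empty).items := by
      rw [hin]; exact List.mem_map.mpr ⟨b, hb, rfl⟩
    exact PySem.Dict.getD_of_mem_items _ hmem2 (by rw [hinkeys]; exact hnd) 0

-- the canonical items list of a dict satisfying the invariant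
lemma pvToCanonical (items : List String) (hnd : items.Nodup) (g : String → String → Int)
    (S : PySem.Dict String (PySem.Dict String Int)) (h : pvInv items g S) :
    S.items.map (fun p => (p.1, p.2.items)) =
      items.map (fun a => (a, items.map (fun b => (b, g a b)))) := by
  obtain ⟨hk, hik, hval⟩ := h
  rw [PySem.Dict.items_eq_map_keys _ (by rw [hk]; exact hnd) PySem.Dict.empty, hk, List.map_map]
  refine List.map_congr_left ?_
  intro a ha
  simp only [Function.comp]
  rw [PySem.Dict.items_eq_map_keys _ (by rw [hik a ha]; exact hnd) 0, hik a ha]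
  refine Prod.ext rfl ?_
  refine List.map_congr_left ?_
  intro b hb
  rw [hval a ha b hb]

-- ===== B-side lemmas =====

-- a is in an earlier group than b
def pvEarlier (a b : String) : List (List String) → Bool
  | [] => false
  | g :: rest => (decide (a ∈ g) && decide (b ∈ rest.flatten)) || pvEarlier a b rest

lemma pvEarlier_mem_left {a b : String} {gs : List (List String)}
    (h : pvEarlier a b gs = true) : a ∈ gs.flatten := by
  induction gs with
  | nil => simp [pvEarlier] at h
  | cons g rest ih =>
    simp only [pvEarlier, Bool.or_eq_true, Bool.and_eq_true, decide_eq_true_eq] at h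
    rcases h with ⟨h1, _⟩ | h2
    · simp [List.mem_flatten]; exact Or.inl h1
    · simpa [List.mem_flatten] using Or.inr (by simpa [List.mem_flatten] using ih h2)

lemma pvEarlier_mem_right {a b : String} {gs : List (List String)}
    (h : pvEarlier a b gs = true) : b ∈ gs.flatten := by
  induction gs with
  | nil => simp [pvEarlier] at h
  | cons g rest ih =>
    simp only [pvEarlier, Bool.or_eq_true, Bool.and_eq_true, decide_eq_true_eq] at h
    rcases h with ⟨_, h1⟩ | h2
    · simp only [List.flatten_cons, List.mem_append]; exact Or.inr h1
    · simp only [List.flatten_cons, List.mem_append]; exact Or.inr (ih h2)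

-- B's value-level increment loop over one group
lemma pvIncE (bs : List String) (E : PySem.Dict String Int) (hnd : bs.Nodup)
    (hmem : ∀ b ∈ bs, b ∈ E.keys) :
    ((bs.foldl (fun E b => E.modify b 0 (fun v => v + 1)) E).keys = E.keys ∧
     ∀ b', (bs.foldl (fun E b => E.modify b 0 (fun v => v + 1)) E).getD b' 0 =
       E.getD b' 0 + if b' ∈ bs then 1 else 0) := by
  constructor
  · rw [PySem.Dict.keys_foldl_modify, PySem.Set.update_eq_append_filter]
    have : ((PySem.Set.ofList bs).filter (fun y => !(PySem.Set.contains E.keys y))) = [] := by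
      apply List.filter_eq_nil_iff.mpr
      intro b hb
      have hbk : b ∈ E.keys := hmem b ((PySem.Set.mem_ofList _ _).mp hb)
      simp [PySem.Set.contains, hbk]
    rw [this, List.append_nil]
  · intro b'
    rw [PySem.Dict.getD_foldl_modify_add_one]
    by_cases hb : b' ∈ bs
    · rw [List.count_eq_one_of_mem hnd hb]; simp [hb]
    · rw [List.count_eq_zero_of_not_mem hb]; simp [hb]

-- B's row loop over prev only touches the outer entry at a
lemma pvIncS (a : String) (F : String → PySem.Dict String Int → PySem.Dict String Int)
    (bs : List String) (S : PySem.Dict String (PySem.Dict String Int)) :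
    ((a ∈ S.keys → (bs.foldl (fun S b => S.modify a PySem.Dict.empty (fun E => F b E)) S).keys = S.keys) ∧
     (∀ a', a' ≠ a → (bs.foldl (fun S b => S.modify a PySem.Dict.empty (fun E => F b E)) S).getD a' PySem.Dict.empty = S.getD a' PySem.Dict.empty) ∧
     (bs.foldl (fun S b => S.modify a PySem.Dict.empty (fun E => F b E)) S).getD a PySem.Dict.empty =
       bs.foldl (fun E b => F b E) (S.getD a PySem.Dict.empty)) := by
  induction bs generalizing S with
  | nil => exact ⟨fun _ => rfl, fun _ _ => rfl, rfl⟩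
  | cons b bs ih =>
    obtain ⟨ihk, ihne, iha⟩ := ih (S.modify a PySem.Dict.empty (fun E => F b E))
    refine ⟨fun haS => ?_, fun a' ha' => ?_, ?_⟩
    · rw [List.foldl_cons]
      have hk := pvKeys_modify_of_mem S a PySem.Dict.empty (fun E => F b E) haS
      exact (ihk (by rw [hk]; exact haS)).trans hk
    · rw [List.foldl_cons, ihne a' ha', PySem.Dict.getD_modify_of_ne _ _ _ ha']
    · rw [List.foldl_cons, iha, PySem.Dict.getD_modify_self, List.foldl_cons]

-- cross-product bulk increment: every cell in as × bs gains one
lemma pvCross (items : List String) :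
    ∀ (as_ : List String), as_.Nodup → (∀ x ∈ as_, x ∈ items) →
      ∀ (bs : List String), bs.Nodup → (∀ x ∈ bs, x ∈ items) →
      ∀ (S : PySem.Dict String (PySem.Dict String Int)) (g : String → String → Int),
        pvInv items g S →
        pvInv items (fun a b => g a b + if a ∈ as_ ∧ b ∈ bs then 1 else 0)
          (as_.foldl (fun S a =>
            bs.foldl (fun S b =>
              S.modify a PySem.Dict.empty (fun E => E.modify b 0 (fun v => v + 1))) S) S) := by
  intro as_
  induction as_ with
  | nil =>
    intro _ _ bs _ _ S g h
    exact pvInv_congr h (by intro a _ b _; simp)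
  | cons a as ih =>
    intro hnd_as hsub bs hnd_bs hsub_bs S g h
    have ha : a ∈ items := hsub a (List.mem_cons_self ..)
    have hanotin : a ∉ as := (List.nodup_cons.mp hnd_as).1
    obtain ⟨hk, hik, hval⟩ := h
    obtain ⟨hSk, hSne, hSa⟩ := pvIncS a
      (fun b E => E.modify b 0 (fun v => v + 1)) bs S
    obtain ⟨hEk, hEv⟩ := pvIncE bs (S.getD a PySem.Dict.empty) hnd_bs
      (fun b hb => (hik a ha) ▸ hsub_bs b hb)
    rw [List.foldl_cons]
    have h' : pvInv items
        (fun a' b => if a' = a ∧ b ∈ bs then g a' b + 1 else g a' b)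
        (bs.foldl (fun S b =>
          S.modify a PySem.Dict.empty (fun E => E.modify b 0 (fun v => v + 1))) S) := by
      refine ⟨(hSk (hk ▸ ha)).trans hk, ?_, ?_⟩
      · intro a' ha'
        by_cases haa : a' = a
        · subst haa; rw [hSa, hEk]; exact hik a' ha'
        · rw [hSne a' haa]; exact hik a' ha'
      · intro a' ha' b hb
        by_cases haa : a' = a
        · subst haa
          rw [hSa, hEv b, hval a' ha' b hb]
          by_cases hbbs : b ∈ bs <;> simp [hbbs]
        · rw [hSne a' haa, hval a' ha' b hb]
          simp [haa]
    have h2 := ih (List.nodup_cons.mp hnd_as).2 (fun x hx => hsub x (List.mem_cons_of_mem _ hx))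
      bs hnd_bs hsub_bs _ _ h'
    refine pvInv_congr h2 ?_
    intro a' ha' b hb
    by_cases haa : a' = a
    · subst haa
      simp only [hanotin, List.mem_cons, true_or, true_and, false_and]
      by_cases hbbs : b ∈ bs <;> simp [hbbs]
    · by_cases hmas : a' ∈ as <;> by_cases hbbs : b ∈ bs <;>
        simp [haa, hmas, hbbs, List.mem_cons]

-- the prev/groups fold of B's per-dict pass
lemma pvGroupsFold (items : List String) (hnd : items.Nodup) :
    ∀ (gs : List (List String)) (prev : List String)
      (S : PySem.Dict String (PySem.Dict String Int)) (g : String → String → Int),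
      pvInv items g S → (prev ++ gs.flatten).Nodup →
      (∀ x ∈ prev, x ∈ items) → (∀ x ∈ gs.flatten, x ∈ items) →
      pvInv items
        (fun a b => g a b +
          if (a ∈ prev ∧ b ∈ gs.flatten) ∨ pvEarlier a b gs then 1 else 0)
        ((gs.foldl (fun (sp : PySem.Dict String (PySem.Dict String Int) × List String) g' =>
            (sp.2.foldl (fun S a =>
                g'.foldl (fun S b =>
                  S.modify a PySem.Dict.empty (fun E => E.modify b 0 (fun v => v + 1))) S) sp.1,
             sp.2 ++ g')) (S, prev)).1) := by
  intro gs
  induction gs with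
  | nil =>
    intro prev S g h _ _ _
    exact pvInv_congr h (by intro a _ b _; simp [pvEarlier])
  | cons gr rest ih =>
    intro prev S g h hnodup hprev hflat
    have hfl : ∀ x ∈ (gr :: rest).flatten, x ∈ items := hflat
    have hgr_sub : ∀ x ∈ gr, x ∈ items := fun x hx =>
      hflat x (by simp [List.mem_flatten]; exact Or.inl hx)
    have hrest_sub : ∀ x ∈ rest.flatten, x ∈ items := fun x hx =>
      hflat x (by simp only [List.flatten_cons, List.mem_append]; exact Or.inr hx)
    -- split the nodup hypothesis
    have hnd2 : (prev ++ (gr ++ rest.flatten)).Nodup := by simpa using hnodup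
    have hprev_nd : prev.Nodup := ((List.nodup_append).mp hnd2).1
    have hgrfl_nd : (gr ++ rest.flatten).Nodup := ((List.nodup_append).mp hnd2).2.1
    have hgr_nd : gr.Nodup := ((List.nodup_append).mp hgrfl_nd).1
    have hdis_p_grfl : ∀ x ∈ prev, x ∉ (gr ++ rest.flatten) := fun x hx hy =>
      (List.nodup_append.mp hnd2).2.2 x hx x hy rfl
    have hdis_gr_fl : ∀ x ∈ gr, x ∉ rest.flatten := fun x hx hy =>
      (List.nodup_append.mp hgrfl_nd).2.2 x hx x hy rfl
    have hdis_p_gr : ∀ x ∈ prev, x ∉ gr := fun x hx hy =>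
      hdis_p_grfl x hx (List.mem_append_left _ hy)
    have hdis_p_fl : ∀ x ∈ prev, x ∉ rest.flatten := fun x hx hy =>
      hdis_p_grfl x hx (List.mem_append_right _ hy)
    rw [List.foldl_cons]
    have h1 := pvCross items prev hprev_nd hprev gr hgr_nd hgr_sub S g h
    have hnodup' : ((prev ++ gr) ++ rest.flatten).Nodup := by simpa [List.append_assoc] using hnd2
    have hprev' : ∀ x ∈ prev ++ gr, x ∈ items := by
      intro x hx; rcases List.mem_append.mp hx with hx | hx
      · exact hprev x hx
      · exact hgr_sub x hx
    have h2 := ih (prev ++ gr) _ _ h1 hnodup' hprev' hrest_sub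
    refine pvInv_congr h2 ?_
    intro a ha b hb
    have hEa : pvEarlier a b rest = true → a ∈ rest.flatten := pvEarlier_mem_left
    simp only [pvEarlier, List.flatten_cons, List.mem_append, Bool.or_eq_true,
      Bool.and_eq_true, decide_eq_true_eq]
    by_cases h1a : a ∈ prev <;> by_cases h2a : a ∈ gr <;>
      by_cases h1b : b ∈ gr <;> by_cases h2b : b ∈ rest.flatten <;>
      by_cases hE : pvEarlier a b rest = true <;>
      first
      | (exact absurd h2a (hdis_p_gr a h1a))
      | (exact absurd h2b (hdis_gr_fl b h1b))
      | (exact absurd (hEa hE) (hdis_p_fl a h1a))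
      | (exact absurd (hEa hE) (hdis_gr_fl a h2a))
      | (simp [h1a, h2a, h1b, h2b, hE]; try ring)

-- earlier-group membership decides the strict value order
lemma pvEarlier_iff (d : List (String × Int)) (items : List String) :
    ∀ (vs : List Int), vs.Pairwise (· < ·) →
      ∀ a b, a ∈ items → b ∈ items → pvDget d a ∈ vs → pvDget d b ∈ vs →
      (pvEarlier a b (vs.map (fun v => items.filter (fun x => pvDget d x == v))) = true ↔
        pvDget d a < pvDget d b) := by
  intro vs
  induction vs with
  | nil => intro _ a b _ _ hav; simp at hav
  | cons v vt ih =>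
    intro hpw a b hai hbi hav hbv
    have hv_lt : ∀ w ∈ vt, v < w := (List.pairwise_cons.mp hpw).1
    have hpw' : vt.Pairwise (· < ·) := (List.pairwise_cons.mp hpw).2
    have hmemflat : ∀ (x : String),
        x ∈ (vt.map (fun v => items.filter (fun y => pvDget d y == v))).flatten ↔
          (x ∈ items ∧ pvDget d x ∈ vt) := by
      intro x
      simp only [List.mem_flatten, List.mem_map]
      constructor
      · rintro ⟨l, ⟨v', hv', rfl⟩, hxl⟩
        obtain ⟨hxi, hxv⟩ := List.mem_filter.mp hxl
        exact ⟨hxi, by rwa [beq_iff_eq.mp hxv]⟩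
      · rintro ⟨hxi, hxv⟩
        exact ⟨_, ⟨pvDget d x, hxv, rfl⟩, List.mem_filter.mpr ⟨hxi, by simp⟩⟩
    simp only [List.map_cons, pvEarlier, Bool.or_eq_true, Bool.and_eq_true, decide_eq_true_eq]
    by_cases ha : pvDget d a = v
    · have hag : a ∈ items.filter (fun x => pvDget d x == v) :=
        List.mem_filter.mpr ⟨hai, by simp [ha]⟩
      have hnotE : ¬ pvEarlier a b (vt.map (fun v => items.filter (fun x => pvDget d x == v))) = true := by
        intro hE
        have hmem := (hmemflat a).mp (pvEarlier_mem_left hE)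
        exact absurd (hv_lt _ (ha ▸ hmem.2)) (lt_irrefl v)
      rcases List.mem_cons.mp hbv with hb | hb
      · -- d[b] = v too: no strictly later group contains b, and v < v is false
        have hnotb : ¬ b ∈ (vt.map (fun v => items.filter (fun x => pvDget d x == v))).flatten := by
          intro hmem
          exact absurd (hv_lt _ (hb ▸ (hmemflat b).mp hmem).2) (lt_irrefl v)
        simp [hnotE, hnotb, ha, hb]
      · have hbmem : b ∈ (vt.map (fun v => items.filter (fun x => pvDget d x == v))).flatten :=
          (hmemflat b).mpr ⟨hbi, hb⟩
        simp [hnotE, hbmem, hag, ha, hv_lt _ hb]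
    · have hav' : pvDget d a ∈ vt := by
        rcases List.mem_cons.mp hav with h | h
        · exact absurd h ha
        · exact h
      have hag : ¬ a ∈ items.filter (fun x => pvDget d x == v) := by
        simp [List.mem_filter, ha]
      rcases List.mem_cons.mp hbv with hb | hb
      · -- d[b] = v: b is in no later group, and d[a] < v is false since v < d[a]
        have hnotE : ¬ pvEarlier a b (vt.map (fun v => items.filter (fun x => pvDget d x == v))) = true := by
          intro hE
          exact absurd (hv_lt _ (hb ▸ (hmemflat b).mp (pvEarlier_mem_right hE)).2) (lt_irrefl v)
        have : ¬ pvDget d a < pvDget d b := by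
          rw [hb]; exact not_lt_of_gt (hv_lt _ hav')
        simp [hnotE, hag, this]
      · simp only [hag, false_and, false_or]
        exact ih hpw' a b hai hbi hav' hb

-- one dict's pass of B adds the comparison indicator to every cell
lemma pvBStepInv (items : List String) (hnd : items.Nodup) (d : List (String × Int))
    (S : PySem.Dict String (PySem.Dict String Int)) (g : String → String → Int)
    (h : pvInv items g S) :
    pvInv items (fun a b => g a b + if pvLess d a b then 1 else 0) (pvBStep items S d) := by
  -- name the bucket dict and the groups list
  have hbfold : (items.foldl (fun B x => B.modify (pvDget d x) [] (fun l => l ++ [x])) PySem.Dict.empty)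
      = (items.map (fun x => (pvDget d x, x))).foldl
          (fun B p => B.modify p.1 [] (fun l => l ++ [p.2])) PySem.Dict.empty := by
    rw [List.foldl_map]
  have hget : ∀ v, ((items.foldl (fun B x => B.modify (pvDget d x) [] (fun l => l ++ [x]))
      PySem.Dict.empty).getD v []) = items.filter (fun x => pvDget d x == v) := by
    intro v
    rw [hbfold, PySem.Dict.getD_foldl_modify_append]
    simp [List.filter_map, List.map_map, Function.comp_def]
  have hkeys : (items.foldl (fun B x => B.modify (pvDget d x) [] (fun l => l ++ [x]))
      PySem.Dict.empty).keys = PySem.Set.ofList (items.map (pvDget d)) := by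
    rw [PySem.Dict.keys_foldl_modify_key]
    simp [PySem.Set.update_nil_left]
  -- the sorted distinct values and the groups
  have hrepr : pvBStep items S d =
      (((PySem.List.sorted (PySem.Set.ofList (items.map (pvDget d))) (fun v => v) false).map
          (fun v => items.filter (fun x => pvDget d x == v))).foldl
        (fun (sp : PySem.Dict String (PySem.Dict String Int) × List String) g' =>
          (sp.2.foldl (fun S a =>
              g'.foldl (fun S b =>
                S.modify a PySem.Dict.empty (fun E => E.modify b 0 (fun v => v + 1))) S) sp.1,
           sp.2 ++ g')) (S, ([] : List String))).1 := by
    show (((PySem.List.sorted (items.foldl (fun B x => B.modify (pvDget d x) [] (fun l => l ++ [x]))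
        PySem.Dict.empty).keys (fun v => v) false).map
          (fun v => (items.foldl (fun B x => B.modify (pvDget d x) [] (fun l => l ++ [x]))
            PySem.Dict.empty).getD v [])).foldl _ (S, ([] : List String))).1 = _
    rw [hkeys]
    congr 2
    exact List.map_congr_left (fun v _ => hget v)
  set svals := PySem.List.sorted (PySem.Set.ofList (items.map (pvDget d))) (fun v => v) false with hsv
  have hsv_pw : svals.Pairwise (· < ·) := PySem.List.sorted_ofList_pairwise_lt _
  have hsv_mem : ∀ v, v ∈ svals ↔ v ∈ items.map (pvDget d) := by
    intro v
    rw [hsv, PySem.List.mem_sorted]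
    exact PySem.Set.mem_ofList _ _
  have hx_in : ∀ x ∈ items, pvDget d x ∈ svals := fun x hx =>
    (hsv_mem _).mpr (List.mem_map_of_mem hx)
  have hflat_mem : ∀ x, x ∈ ((svals.map (fun v => items.filter (fun y => pvDget d y == v))).flatten) ↔ x ∈ items := by
    intro x
    simp only [List.mem_flatten, List.mem_map]
    constructor
    · rintro ⟨l, ⟨v', _, rfl⟩, hxl⟩
      exact (List.mem_filter.mp hxl).1
    · intro hx
      exact ⟨_, ⟨pvDget d x, hx_in x hx, rfl⟩, List.mem_filter.mpr ⟨hx, by simp⟩⟩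
  have hflat_nd : ((svals.map (fun v => items.filter (fun y => pvDget d y == v))).flatten).Nodup := by
    rw [List.nodup_flatten]
    constructor
    · rintro l hl
      obtain ⟨v', _, rfl⟩ := List.mem_map.mp hl
      exact hnd.filter _
    · rw [List.pairwise_map]
      have hne : svals.Pairwise (· ≠ ·) := hsv_pw.imp (fun h => ne_of_lt h)
      refine hne.imp ?_
      intro v w hvw x hx hy
      obtain ⟨_, hxv⟩ := List.mem_filter.mp hx
      obtain ⟨_, hxw⟩ := List.mem_filter.mp hy
      exact hvw ((beq_iff_eq.mp hxv).symm.trans (beq_iff_eq.mp hxw))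
  rw [hrepr]
  have hfold := pvGroupsFold items hnd
    (svals.map (fun v => items.filter (fun y => pvDget d y == v))) [] S g h
    (by simpa using hflat_nd) (by simp) (fun x hx => (hflat_mem x).mp hx)
  refine pvInv_congr hfold ?_
  intro a ha b hb
  have hEiff := pvEarlier_iff d items svals hsv_pw a b ha hb (hx_in a ha) (hx_in b hb)
  by_cases hl : pvLess d a b
  · have : pvDget d a < pvDget d b := by simpa [pvLess] using hl
    simp [hEiff.mpr this, hl]
  · have hnlt : ¬ pvDget d a < pvDget d b := by simpa [pvLess] using hl
    have hnE : ¬ pvEarlier a b (svals.map (fun v => items.filter (fun y => pvDget d y == v))) = true :=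
      fun hE => hnlt (hEiff.mp hE)
    simp [hnE, hl]

-- B: the loop over the dicts
lemma pvBDicts (items : List String) (hnd : items.Nodup) :
    ∀ (L : List (List (String × Int))) (S : PySem.Dict String (PySem.Dict String Int))
      (g : String → String → Int), pvInv items g S →
      pvInv items (fun a b => g a b + (L.countP (fun d => pvLess d a b) : Int))
        (L.foldl (pvBStep items) S) := by
  intro L
  induction L with
  | nil => intro S g h; exact pvInv_congr h (by intro a _ b _; simp)
  | cons d rest ih =>
    intro S g h
    rw [List.foldl_cons]
    have h2 := ih _ _ (pvBStepInv items hnd d S g h)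
    refine pvInv_congr h2 ?_
    intro a ha b hb
    simp only [List.countP_cons]
    by_cases hl : pvLess d a b <;> push_cast [hl] <;> ring

-- ===== VERDICT (by name: the statement is the Claim_ definition above) =====
theorem get_pairwise_scores_spec : Claim_equal_get_pairwise_scores := by
  intro list_dicts _ hpre
  unfold Spec_get_pairwise_scores
  match list_dicts with
  | [] => exact absurd rfl hpre.1
  | d0 :: rest =>
    simp only [get_pairwise_scores, get_pairwise_scores_alt]
    have hnd := pvItems_nodup d0
    have hA := pvDicts (pvItems d0) hnd (d0 :: rest) _ _ (pvInit (pvItems d0) hnd)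
    have hB := pvBDicts (pvItems d0) hnd (d0 :: rest) _ _ (pvInit (pvItems d0) hnd)
    rw [pvToCanonical _ hnd _ _ hA, pvToCanonical _ hnd _ _ hB]
    refine List.map_congr_left (fun a _ => ?_)
    refine Prod.ext rfl (List.map_congr_left (fun b _ => ?_))
    refine Prod.ext rfl ?_
    show (0 + if a = b then 0 else ((d0 :: rest).countP (fun d => pvLess d a b) : Int)) =
      0 + ((d0 :: rest).countP (fun d => pvLess d a b) : Int)
    by_cases hab : a = b
    · subst hab
      have hz : (d0 :: rest).countP (fun d => pvLess d a a) = 0 :=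
        List.countP_eq_zero.mpr (fun d _ => by simp [pvLess])
      simp [hz]
    · simp [hab]
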